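-- pv_equiv track=rewrite | github.com/luisaparra-info/practica_pki_python | app.py | parse_dn
-- ===== SOURCE A (Python) =====
-- def parse_dn(dn: str):
--     """
--     Función auxiliar para extraer el nombre (CN) y el email
--     a partir del Subject del certificado.
--
--     El parámetro 'dn' suele tener un formato similar a:
--     /C=ES/ST=Andalucía/L=Almeria/O=MiEmpresa/OU=Usuarios/CN=Juan Perez/emailAddress=juan.perez@ejemplo.com
--
--     De ahí queremos obtener:
--         nombre = "Juan Perez"
--         email  = "juan.perez@ejemplo.com"
--     """
--
--     nombre = "Desconocido"
--     email = "No disponible"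
--
--     # Dividimos la cadena por "/" para separar los campos.
--     partes = dn.split("/")
--     for p in partes:
--         p = p.strip()
--         if p.startswith("CN="):
--             nombre = p.replace("CN=", "", 1)
--         elif p.startswith("emailAddress="):
--             email = p.replace("emailAddress=", "", 1)
--
--     return nombre, email
-- ===== SOURCE B (Python) =====
-- def parse_dn(dn: str):
--     d = {}
--     for p in dn.split("/"):
--         key, sep, val = p.strip().partition("=")
--         if sep:
--             d[key] = val
--     return d.get("CN", "Desconocido"), d.get("emailAddress", "No disponible")
-- ===== Notes on version B (the rewrite author's own statement) =====
-- stated objective: simpler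
-- what changed: B splits the DN into fields once, partitions each field at its first separator into a key-value dict (last wins), and answers the two wanted attributes by dict lookup, instead of A's inline per-key prefix tests with replace-count-1.
import Mathlib
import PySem

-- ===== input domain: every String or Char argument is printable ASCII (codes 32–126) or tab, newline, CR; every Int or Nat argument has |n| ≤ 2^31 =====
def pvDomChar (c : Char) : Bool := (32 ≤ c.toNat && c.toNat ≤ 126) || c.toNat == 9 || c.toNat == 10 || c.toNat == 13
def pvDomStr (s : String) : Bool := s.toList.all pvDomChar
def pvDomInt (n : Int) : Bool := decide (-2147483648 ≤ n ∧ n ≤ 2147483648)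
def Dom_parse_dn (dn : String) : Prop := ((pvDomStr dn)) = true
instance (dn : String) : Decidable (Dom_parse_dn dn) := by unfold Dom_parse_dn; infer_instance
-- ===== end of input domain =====

-- B builds a dict of all fields via a partition-at-'=' helper and answers by lookup; simpler, same cost.

-- ===== PORT A =====
-- s.replace(old, new, 1) for a nonempty `old`: replace the first occurrence, scanning left to right
def pvReplace1 (old new : List Char) : List Char → List Char
  | [] => []
  | c :: t => if old.isPrefixOf (c :: t) then new ++ (c :: t).drop old.length
              else c :: pvReplace1 old new t

def pvStepA (st : List Char × List Char) (p0 : List Char) : List Char × List Char :=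
  let p := PySem.Chars.strip p0
  if PySem.Chars.startswith p "CN=".toList then
    (pvReplace1 "CN=".toList [] p, st.2)
  else if PySem.Chars.startswith p "emailAddress=".toList then
    (st.1, pvReplace1 "emailAddress=".toList [] p)
  else st

def parse_dn (dn : String) : String × String :=
  let partes := PySem.Chars.splitOn dn.toList "/".toList
  let r := partes.foldl pvStepA ("Desconocido".toList, "No disponible".toList)
  (String.ofList r.1, String.ofList r.2)

-- ===== PORT B =====
-- key, sep, val = s.partition('='): (before first '=', whether '=' occurs, after it)
def pvPartition : List Char → List Char × Bool × List Char
  | [] => ([], false, [])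
  | c :: t => if c = '=' then ([], true, t)
              else
                let r := pvPartition t
                (c :: r.1, r.2.1, r.2.2)

def pvStepB (d : PySem.Dict (List Char) (List Char)) (p0 : List Char) : PySem.Dict (List Char) (List Char) :=
  let r := pvPartition (PySem.Chars.strip p0)
  if r.2.1 then d.insert r.1 r.2.2 else d

def parse_dn_alt (dn : String) : String × String :=
  let d := (PySem.Chars.splitOn dn.toList "/".toList).foldl pvStepB PySem.Dict.empty
  (String.ofList (d.getD "CN".toList "Desconocido".toList),
   String.ofList (d.getD "emailAddress".toList "No disponible".toList))

-- ===== PRECONDITION & SPEC =====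
def Spec_parse_dn (dn : String) (out : String × String) : Prop := out = parse_dn_alt dn
instance (dn : String) (out : String × String) : Decidable (Spec_parse_dn dn out) := by unfold Spec_parse_dn; infer_instance

-- ===== CLAIM (what is proved, stated in full; the proofs are below) =====
def Claim_equal_parse_dn : Prop := ∀ (dn : String), Dom_parse_dn dn → Spec_parse_dn dn (parse_dn dn)

-- ===== LEMMAS AND PROOFS =====

lemma pvPartition_found : ∀ s : List Char, (pvPartition s).2.1 = true →
    s = (pvPartition s).1 ++ '=' :: (pvPartition s).2.2 := by
  intro s
  induction s with
  | nil => simp [pvPartition]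
  | cons c t ih =>
      by_cases hc : c = '='
      · simp [pvPartition, hc]
      · simp only [pvPartition, if_neg hc]
        intro h
        simpa [hc] using congrArg (c :: ·) (ih h)

lemma pvPartition_of_split : ∀ (k v : List Char), '=' ∉ k →
    pvPartition (k ++ '=' :: v) = (k, true, v) := by
  intro k v hk
  induction k with
  | nil => simp [pvPartition]
  | cons c t ih =>
      have hc : c ≠ '=' := by intro h; exact hk (by simp [h])
      have ht : '=' ∉ t := fun h => hk (by simp [h])
      simp [pvPartition, hc, ih ht]

lemma pvPartition_notfound : ∀ s : List Char, (pvPartition s).2.1 = false → '=' ∉ s := by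
  intro s
  induction s with
  | nil => simp
  | cons c t ih =>
      by_cases hc : c = '='
      · simp [pvPartition, hc]
      · simp only [pvPartition, if_neg hc]
        intro h
        simpa [hc, Ne.symm hc] using ih h

lemma pvReplace1_prefix (old s : List Char) (hne : old ≠ []) (h : old.isPrefixOf s = true) :
    pvReplace1 old [] s = s.drop old.length := by
  cases s with
  | nil =>
      cases old with
      | nil => exact absurd rfl hne
      | cons a b => simp [List.isPrefixOf] at h
  | cons c t => simp [pvReplace1, h]

-- the per-part step preserves the "A's pair = the two lookups in B's dict" relation
lemma pvStep_agree (d : PySem.Dict (List Char) (List Char)) (p0 : List Char) :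
    pvStepA (d.getD "CN".toList "Desconocido".toList,
             d.getD "emailAddress".toList "No disponible".toList) p0
      = ((pvStepB d p0).getD "CN".toList "Desconocido".toList,
         (pvStepB d p0).getD "emailAddress".toList "No disponible".toList) := by
  unfold pvStepA pvStepB
  set q := PySem.Chars.strip p0 with hq
  by_cases hf : (pvPartition q).2.1 = true
  · have hsplit := pvPartition_found q hf
    by_cases hCN : (pvPartition q).1 = "CN".toList
    · have hqeq : q = "CN=".toList ++ (pvPartition q).2.2 := by
        rw [hsplit, hCN]; rfl
      have hpre : PySem.Chars.startswith q "CN=".toList = true := by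
        rw [PySem.Chars.startswith_iff]; exact ⟨(pvPartition q).2.2, hqeq.symm⟩
      have hrep : pvReplace1 "CN=".toList [] q = (pvPartition q).2.2 := by
        rw [pvReplace1_prefix _ _ (by decide)
              (List.isPrefixOf_iff_prefix.mpr ⟨(pvPartition q).2.2, hqeq.symm⟩)]
        rw [hqeq]
        exact List.drop_left
      simp only [hpre, if_pos, hf, hrep, hCN, Prod.mk.injEq]
      constructor
      · exact (PySem.Dict.getD_insert_self d _ _ _).symm
      · exact (PySem.Dict.getD_insert_of_ne d _ _ (by decide)).symm
    · have hnCN : PySem.Chars.startswith q "CN=".toList = false := by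
        by_contra hcon
        have : PySem.Chars.startswith q "CN=".toList = true := by
          cases h' : PySem.Chars.startswith q "CN=".toList
          · exact absurd h' hcon
          · rfl
        obtain ⟨rest, hr⟩ := (PySem.Chars.startswith_iff q _).mp this
        have : pvPartition q = ("CN".toList, true, rest) := by
          rw [← hr]
          have : "CN=".toList ++ rest = "CN".toList ++ '=' :: rest := rfl
          rw [this]
          exact pvPartition_of_split _ _ (by decide)
        exact hCN (by rw [this])
      by_cases hEM : (pvPartition q).1 = "emailAddress".toList
      · have hqeq : q = "emailAddress=".toList ++ (pvPartition q).2.2 := by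
          rw [hsplit, hEM]; rfl
        have hpre : PySem.Chars.startswith q "emailAddress=".toList = true := by
          rw [PySem.Chars.startswith_iff]; exact ⟨(pvPartition q).2.2, hqeq.symm⟩
        have hrep : pvReplace1 "emailAddress=".toList [] q = (pvPartition q).2.2 := by
          rw [pvReplace1_prefix _ _ (by decide)
                (List.isPrefixOf_iff_prefix.mpr ⟨(pvPartition q).2.2, hqeq.symm⟩)]
          rw [hqeq]
          exact List.drop_left
        simp only [hnCN, Bool.false_eq_true, if_false, hpre, if_true, hf, hrep, hEM, Prod.mk.injEq]
        constructor
        · exact (PySem.Dict.getD_insert_of_ne d _ _ (by decide)).symm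
        · exact (PySem.Dict.getD_insert_self d _ _ _).symm
      · have hnEM : PySem.Chars.startswith q "emailAddress=".toList = false := by
          by_contra hcon
          have : PySem.Chars.startswith q "emailAddress=".toList = true := by
            cases h' : PySem.Chars.startswith q "emailAddress=".toList
            · exact absurd h' hcon
            · rfl
          obtain ⟨rest, hr⟩ := (PySem.Chars.startswith_iff q _).mp this
          have : pvPartition q = ("emailAddress".toList, true, rest) := by
            rw [← hr]
            have : "emailAddress=".toList ++ rest = "emailAddress".toList ++ '=' :: rest := rfl
            rw [this]
            exact pvPartition_of_split _ _ (by decide)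
          exact hEM (by rw [this])
        simp only [hnCN, hnEM, Bool.false_eq_true, if_false, hf, if_true, Prod.mk.injEq]
        constructor
        · exact (PySem.Dict.getD_insert_of_ne d _ _ (fun h => hCN h.symm)).symm
        · exact (PySem.Dict.getD_insert_of_ne d _ _ (fun h => hEM h.symm)).symm
  · have hmem := pvPartition_notfound q (by simpa using hf)
    have hnCN : PySem.Chars.startswith q "CN=".toList = false := by
      by_contra hcon
      have : PySem.Chars.startswith q "CN=".toList = true := by
        cases h' : PySem.Chars.startswith q "CN=".toList
        · exact absurd h' hcon
        · rfl
      obtain ⟨rest, hr⟩ := (PySem.Chars.startswith_iff q _).mp this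
      exact hmem (by rw [← hr]; simp)
    have hnEM : PySem.Chars.startswith q "emailAddress=".toList = false := by
      by_contra hcon
      have : PySem.Chars.startswith q "emailAddress=".toList = true := by
        cases h' : PySem.Chars.startswith q "emailAddress=".toList
        · exact absurd h' hcon
        · rfl
      obtain ⟨rest, hr⟩ := (PySem.Chars.startswith_iff q _).mp this
      exact hmem (by rw [← hr]; simp)
    have hf' : (pvPartition q).2.1 = false := by simpa using hf
    simp only [hnCN, hnEM, hf', Bool.false_eq_true, if_false]

lemma pvFold_agree (ps : List (List Char)) :
    ∀ d : PySem.Dict (List Char) (List Char),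
    ps.foldl pvStepA (d.getD "CN".toList "Desconocido".toList,
                      d.getD "emailAddress".toList "No disponible".toList)
      = ((ps.foldl pvStepB d).getD "CN".toList "Desconocido".toList,
         (ps.foldl pvStepB d).getD "emailAddress".toList "No disponible".toList) := by
  induction ps with
  | nil => intro d; rfl
  | cons p ps ih =>
      intro d
      simp only [List.foldl_cons]
      rw [pvStep_agree d p]
      exact ih (pvStepB d p)

-- ===== VERDICT (by name: the statement is the Claim_ definition above) =====
theorem parse_dn_spec : Claim_equal_parse_dn := by
  intro dn _
  unfold Spec_parse_dn parse_dn parse_dn_alt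
  have h := pvFold_agree (PySem.Chars.splitOn dn.toList "/".toList) PySem.Dict.empty
  have hinit : (PySem.Dict.empty : PySem.Dict (List Char) (List Char)).getD "CN".toList "Desconocido".toList
      = "Desconocido".toList := rfl
  have hinit2 : (PySem.Dict.empty : PySem.Dict (List Char) (List Char)).getD "emailAddress".toList "No disponible".toList
      = "No disponible".toList := rfl
  rw [hinit, hinit2] at h
  simp only [h]
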